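-- pv_equiv track=rewrite | github.com/k1monfared/notes | blog/files/20251201/probability_calculations.py | can_make_sum
-- ===== SOURCE A (Python) =====
-- def can_make_sum(dice, target_sum):
--     """Check if 4 dice can be paired to make target_sum"""
--     d1, d2, d3, d4 = dice
--     pairings = [
--         [(d1, d2), (d3, d4)],
--         [(d1, d3), (d2, d4)],
--         [(d1, d4), (d2, d3)]
--     ]
--     for pairing in pairings:
--         for pair in pairing:
--             if sum(pair) == target_sum:
--                 return True
--     return False
-- ===== SOURCE B (Python) =====
-- def can_make_sum(dice, target_sum):
--     """Check if 4 dice can be paired to make target_sum"""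
--     seen = set()
--     for d in dice:
--         if target_sum - d in seen:
--             return True
--         seen.add(d)
--     return False
-- ===== Notes on version B (the rewrite author's own statement) =====
-- stated objective: idiomatic
-- what changed: Replaced the explicit enumeration of the three pairings (six pairs) with a single complement-lookup pass over the dice using a 'seen' set.
import Mathlib
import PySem

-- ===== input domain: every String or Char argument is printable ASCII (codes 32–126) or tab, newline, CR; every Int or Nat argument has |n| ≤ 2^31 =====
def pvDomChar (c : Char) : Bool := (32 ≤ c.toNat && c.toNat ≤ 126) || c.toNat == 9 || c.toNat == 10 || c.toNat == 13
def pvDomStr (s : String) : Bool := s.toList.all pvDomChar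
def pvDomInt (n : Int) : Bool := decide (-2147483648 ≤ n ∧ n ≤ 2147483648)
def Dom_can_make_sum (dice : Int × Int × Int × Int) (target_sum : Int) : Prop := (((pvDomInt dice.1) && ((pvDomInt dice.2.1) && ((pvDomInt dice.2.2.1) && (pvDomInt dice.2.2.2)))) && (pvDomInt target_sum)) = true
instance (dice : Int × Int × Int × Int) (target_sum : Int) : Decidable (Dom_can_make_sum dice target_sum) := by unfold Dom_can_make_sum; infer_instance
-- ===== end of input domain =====

-- B replaces A's enumeration of the three pairings with one complement-lookup pass over a 'seen' set (idiomatic; same cost).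

-- ===== PORT A =====
-- Port of A: enumerate the three pairings, return true on the first pair summing to target.
def can_make_sum (dice : Int × Int × Int × Int) (target_sum : Int) : Bool :=
  let d1 := dice.1; let d2 := dice.2.1; let d3 := dice.2.2.1; let d4 := dice.2.2.2
  let pairings : List (List (Int × Int)) :=
    [[(d1, d2), (d3, d4)],
     [(d1, d3), (d2, d4)],
     [(d1, d4), (d2, d3)]]
  pairings.any (fun pairing => pairing.any (fun pair => pair.1 + pair.2 == target_sum))

-- ===== PORT B =====
-- Port of B: single pass over the dice with a 'seen' set, complement lookup before insert.
def canMakeSumGo (t : Int) : List Int → PySem.Set Int → Bool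
  | [], _ => false
  | d :: rest, seen =>
      if (t - d) ∈ seen then true else canMakeSumGo t rest (seen.add d)

def can_make_sum_alt (dice : Int × Int × Int × Int) (target_sum : Int) : Bool :=
  canMakeSumGo target_sum [dice.1, dice.2.1, dice.2.2.1, dice.2.2.2] (PySem.Set.ofList [])

-- ===== PRECONDITION & SPEC =====
def Spec_can_make_sum (dice : Int × Int × Int × Int) (target_sum : Int) (out : Bool) : Prop := out = can_make_sum_alt dice target_sum
instance (dice : Int × Int × Int × Int) (target_sum : Int) (out : Bool) : Decidable (Spec_can_make_sum dice target_sum out) := by unfold Spec_can_make_sum; infer_instance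

-- ===== CLAIM (what is proved, stated in full; the proofs are below) =====
def Claim_equal_can_make_sum : Prop := ∀ (dice : Int × Int × Int × Int) (target_sum : Int), Dom_can_make_sum dice target_sum → Spec_can_make_sum dice target_sum (can_make_sum dice target_sum)

-- ===== LEMMAS AND PROOFS =====

-- ===== VERDICT (by name: the statement is the Claim_ definition above) =====
theorem can_make_sum_spec : Claim_equal_can_make_sum := by
  intro dice t _
  obtain ⟨d1, d2, d3, d4⟩ := dice
  show can_make_sum (d1, d2, d3, d4) t = can_make_sum_alt (d1, d2, d3, d4) t
  simp only [can_make_sum, can_make_sum_alt, canMakeSumGo, List.any_cons, List.any_nil,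
    PySem.Set.mem_add, PySem.Set.ofList_nil, List.not_mem_nil, false_or, Bool.or_false]
  split_ifs <;> simp_all <;> omega
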